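-- pv_equiv track=rewrite | github.com/pencode-lab/pdf2reports | module/common.py | compose_rows
-- ===== SOURCE A (Python) =====
-- def compose_rows(text_list, min_row_space=16):
--
--     '''
--     from parse_text_box() get text list
--     this function compose rows
--     '''
--     iter_texts=iter(text_list)
--
--     _row=[]
--     rows_list =[]
--
--     while True :
--         try:
--             #same rows do in a while()
--             prv_text=None
--             while True:
--                 text=next(iter_texts)
--                 if prv_text:
--
--                     #Make sure  save  all text in the same row
--                     if prv_text.get('top')== text.get('top'):
--                         row_space = 0
--                     elif prv_text.get('top') <= text.get('top'):
--                         row_space =text.get('top') - (prv_text.get('top') + prv_text.get('height'))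
--                     else:
--                         row_space =prv_text.get('top') - (text.get('top') + text.get('height'))
--
--                     if abs(row_space) > min_row_space:#is't in same row
--                         #save row and start new row
--                         rows_list.append(_row.copy())
--                         prv_text=None
--                         _row.clear()
--
--                 _row.append(text)
--                 prv_text = text
--         except StopIteration:
--             rows_list.append(_row.copy())
--             break
--         #end try
--     #end while
--
--     return rows_list
-- ===== SOURCE B (Python) =====
-- def compose_rows(text_list, min_row_space=16):
--     '''compose rows: compute break positions in one pass, then slice.'''
--     def _is_break(p, c):
--         if not p:
--             return False
--         if p.get('top') == c.get('top'):
--             row_space = 0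
--         elif p.get('top') <= c.get('top'):
--             row_space = c.get('top') - (p.get('top') + p.get('height'))
--         else:
--             row_space = p.get('top') - (c.get('top') + c.get('height'))
--         return abs(row_space) > min_row_space
--
--     breaks = [i for i, (p, c) in enumerate(zip(text_list, text_list[1:]), 1)
--               if _is_break(p, c)]
--     bounds = [0] + breaks + [len(text_list)]
--     return [text_list[a:b] for a, b in zip(bounds, bounds[1:])]
-- ===== Notes on version B (the rewrite author's own statement) =====
-- stated objective: alternative
-- what changed: Replaces A's while/next()/StopIteration state machine with mutable row state by a two-pass shape: one pass computes the list of break indices from adjacent pairs, a second pass slices text_list at those bounds.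
import Mathlib
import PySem

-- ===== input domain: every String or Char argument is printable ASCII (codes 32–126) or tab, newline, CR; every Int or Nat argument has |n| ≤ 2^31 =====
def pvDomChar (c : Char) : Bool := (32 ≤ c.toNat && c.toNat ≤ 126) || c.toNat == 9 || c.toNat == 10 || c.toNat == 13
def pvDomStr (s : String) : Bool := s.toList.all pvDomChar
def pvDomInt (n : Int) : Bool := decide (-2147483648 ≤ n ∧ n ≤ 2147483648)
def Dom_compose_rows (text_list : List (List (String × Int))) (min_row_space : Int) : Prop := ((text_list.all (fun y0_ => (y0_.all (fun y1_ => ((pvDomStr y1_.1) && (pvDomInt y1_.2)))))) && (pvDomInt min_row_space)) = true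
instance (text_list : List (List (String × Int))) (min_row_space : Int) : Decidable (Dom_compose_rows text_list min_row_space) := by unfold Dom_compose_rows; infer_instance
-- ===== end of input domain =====

-- B replaces A's while/next()/StopIteration state machine by break-index computation followed by slicing (alternative decomposition, same cost).

-- ===== PORT A =====
-- d.get(k): first matching key of the association list (dict → assoc list, lookup = first match)
def pvGet (d : List (String × Int)) (k : String) : Option Int :=
  (d.find? (fun kv => kv.1 == k)).map (fun kv => kv.2)

-- the three-way row_space rule appearing verbatim in both Python sources;
-- the `| _, _ => 0` branch is where Python raises TypeError (None compared/added to int) — excluded by Pre_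
def pvRowSpace (p c : List (String × Int)) : Int :=
  if pvGet p "top" = pvGet c "top" then 0
  else
    match pvGet p "top", pvGet c "top" with
    | some a, some b =>
        if a ≤ b then b - (a + (pvGet p "height").getD 0)
        else a - (b + (pvGet c "height").getD 0)
    | _, _ => 0

-- A's iterator loop as structural recursion over the remaining texts with state (prv_text, _row, rows_list)
def composeRowsGo (m : Int) :
    List (List (String × Int)) → Option (List (String × Int)) →
    List (List (String × Int)) → List (List (List (String × Int))) →
    List (List (List (String × Int)))
  | [], _, row, rows => rows ++ [row]
  | t :: ts, prv, row, rows =>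
    match prv with
    | some p =>
      if p ≠ [] then
        if |pvRowSpace p t| > m then
          composeRowsGo m ts (some t) [t] (rows ++ [row])
        else
          composeRowsGo m ts (some t) (row ++ [t]) rows
      else composeRowsGo m ts (some t) (row ++ [t]) rows
    | none => composeRowsGo m ts (some t) (row ++ [t]) rows

def compose_rows (text_list : List (List (String × Int))) (min_row_space : Int) : List (List (List (String × Int))) :=
  composeRowsGo min_row_space text_list none [] []

-- ===== PORT B =====
-- Source B's _is_break(p, c)
def pvIsBreak (m : Int) (p c : List (String × Int)) : Bool :=
  if p = [] then false else decide (|pvRowSpace p c| > m)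

def compose_rows_alt (text_list : List (List (String × Int))) (min_row_space : Int) : List (List (List (String × Int))) :=
  let breaks : List Int :=
    ((PySem.List.enumerate (text_list.zip (PySem.List.slice text_list (some 1) none)) 1).filter
      (fun ic => pvIsBreak min_row_space ic.2.1 ic.2.2)).map (fun ic => ic.1)
  let bounds : List Int := 0 :: breaks ++ [(text_list.length : Int)]
  (bounds.zip bounds.tail).map (fun ab => PySem.List.slice text_list (some ab.1) (some ab.2))

-- ===== PRECONDITION & SPEC =====
-- Pre_ excludes exactly the inputs on which A raises TypeError: an adjacent pair whose predecessor dict is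
-- non-empty (truthy) and whose 'top'/'height' values needed by the three-way comparison are missing (None).
def pvPairOk (p c : List (String × Int)) : Bool :=
  (p = []) ||
  (match pvGet p "top", pvGet c "top" with
   | some a, some b => (a == b) || (if a ≤ b then (pvGet p "height").isSome else (pvGet c "height").isSome)
   | none, none => true
   | _, _ => false)

def pvChainOk : List (List (String × Int)) → Bool
  | [] => true
  | [_] => true
  | p :: c :: ts => pvPairOk p c && pvChainOk (c :: ts)

def Pre_compose_rows (text_list : List (List (String × Int))) (min_row_space : Int) : Prop :=
  pvChainOk text_list = true

instance (text_list : List (List (String × Int))) (min_row_space : Int) : Decidable (Pre_compose_rows text_list min_row_space) := by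
  unfold Pre_compose_rows; infer_instance

def pvWitness_compose_rows : (List (List (String × Int))) × Int :=
  ([[("top", 0), ("height", 10)], [("top", 30), ("height", 10)], [("top", 32), ("height", 8)]], 16)

def Spec_compose_rows (text_list : List (List (String × Int))) (min_row_space : Int) (out : List (List (List (String × Int)))) : Prop := out = compose_rows_alt text_list min_row_space
instance (text_list : List (List (String × Int))) (min_row_space : Int) (out : List (List (List (String × Int)))) : Decidable (Spec_compose_rows text_list min_row_space out) := by unfold Spec_compose_rows; infer_instance

-- ===== CLAIM (what is proved, stated in full; the proofs are below) =====
def Claim_equal_compose_rows : Prop := ∀ (text_list : List (List (String × Int))) (min_row_space : Int), Dom_compose_rows text_list min_row_space → Pre_compose_rows text_list min_row_space → Spec_compose_rows text_list min_row_space (compose_rows text_list min_row_space)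

-- ===== LEMMAS AND PROOFS =====

-- common specification: group the texts, carrying the previous text and the current row
def pvGrp (m : Int) (p : List (String × Int)) (row : List (List (String × Int))) :
    List (List (String × Int)) → List (List (List (String × Int)))
  | [] => [row]
  | t :: ts => if pvIsBreak m p t then row :: pvGrp m t [t] ts else pvGrp m t (row ++ [t]) ts

-- A-side characterisation
theorem composeRowsGo_eq (m : Int) (ts : List (List (String × Int))) :
    ∀ p row rows, composeRowsGo m ts (some p) row rows = rows ++ pvGrp m p row ts := by
  induction ts with
  | nil => intro p row rows; simp [composeRowsGo, pvGrp]
  | cons t ts ih =>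
    intro p row rows
    by_cases hp : p = []
    · simp [composeRowsGo, pvGrp, pvIsBreak, hp, ih]
    · by_cases hb : |pvRowSpace p t| > m
      · simp [composeRowsGo, pvGrp, pvIsBreak, hp, hb, ih]
      · simp [composeRowsGo, pvGrp, pvIsBreak, hp, hb, ih]

-- B-side: the break indices, as structural recursion over the adjacent pairs (Nat indices)
def pvBrk (m : Int) (i : Nat) : List (String × Int) → List (List (String × Int)) → List Nat
  | _, [] => []
  | p, c :: ts => if pvIsBreak m p c then i :: pvBrk m (i + 1) c ts else pvBrk m (i + 1) c ts

theorem enumerate_filter_eq_pvBrk (m : Int) (ts : List (List (String × Int))) :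
    ∀ (p : List (String × Int)) (i : Nat),
      ((PySem.List.enumerate ((p :: ts).zip ts) (i : Int)).filter
        (fun ic => pvIsBreak m ic.2.1 ic.2.2)).map (fun ic => ic.1)
      = (pvBrk m i p ts).map (fun (k : Nat) => (k : Int)) := by
  induction ts with
  | nil => intro p i; simp [PySem.List.enumerate_nil, pvBrk]
  | cons c ts ih =>
    intro p i
    have ih' := ih c (i + 1)
    rw [Nat.cast_add, Nat.cast_one] at ih'
    by_cases hb : pvIsBreak m p c
    · simp [PySem.List.enumerate_cons, pvBrk, hb, ih']
    · simp [PySem.List.enumerate_cons, pvBrk, hb, ih']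

-- Nat-level slicing along consecutive bounds
def pvSliceMap (xs : List (List (String × Int))) (bs : List Nat) : List (List (List (String × Int))) :=
  (bs.zip bs.tail).map (fun ab => (xs.drop ab.1).take (ab.2 - ab.1))

def pvMapHead (f : List (List (String × Int)) → List (List (String × Int))) :
    List (List (List (String × Int))) → List (List (List (String × Int)))
  | [] => []
  | r :: rs => f r :: rs

theorem pvBrk_shift (m : Int) (ts : List (List (String × Int))) :
    ∀ p i, pvBrk m (i + 1) p ts = (pvBrk m i p ts).map (fun k => k + 1) := by
  induction ts with
  | nil => intro p i; simp [pvBrk]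
  | cons c ts ih =>
    intro p i
    by_cases hb : pvIsBreak m p c
    · simp [pvBrk, hb, ih]
    · simp [pvBrk, hb, ih]

theorem pvSliceMap_shift (t : List (String × Int)) (xs : List (List (String × Int)))
    (bs : List Nat) : pvSliceMap (t :: xs) (bs.map (fun k => k + 1)) = pvSliceMap xs bs := by
  unfold pvSliceMap
  rw [show (bs.map (fun k => k + 1)).tail = bs.tail.map (fun k => k + 1) from by cases bs <;> simp,
      List.zip_map]
  rw [List.map_map]
  apply List.map_congr_left
  intro ab _
  simp [Nat.succ_sub_succ]

theorem pvSliceMap_cons (t : List (String × Int)) (xs : List (List (String × Int)))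
    (bs : List Nat) :
    pvSliceMap (t :: xs) (0 :: bs.map (fun k => k + 1)) =
      pvMapHead (fun r => t :: r) (pvSliceMap xs (0 :: bs)) := by
  cases bs with
  | nil => simp [pvSliceMap, pvMapHead]
  | cons b rest =>
    have h := pvSliceMap_shift t xs (b :: rest)
    simp only [pvSliceMap, List.map_cons, List.tail_cons, List.zip_cons_cons, List.map_cons,
      pvMapHead] at h ⊢
    rw [h]
    simp [List.take_succ_cons]

theorem pvGrp_prepend (m : Int) (ts : List (List (String × Int))) :
    ∀ p row pre, pvGrp m p (pre ++ row) ts = pvMapHead (fun r => pre ++ r) (pvGrp m p row ts) := by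
  induction ts with
  | nil => intro p row pre; simp [pvGrp, pvMapHead]
  | cons t ts ih =>
    intro p row pre
    by_cases hb : pvIsBreak m p t
    · simp [pvGrp, hb, pvMapHead]
    · simp only [pvGrp, hb, Bool.false_eq_true, ite_false, List.append_assoc]
      exact ih t (row ++ [t]) pre

theorem pvSliceMap_eq_pvGrp (m : Int) (ts : List (List (String × Int))) :
    ∀ t, pvSliceMap (t :: ts) (0 :: pvBrk m 1 t ts ++ [ts.length + 1]) = pvGrp m t [t] ts := by
  induction ts with
  | nil => intro t; simp [pvBrk, pvSliceMap, pvGrp]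
  | cons c ts ih =>
    intro t
    have hshift : pvBrk m 2 c ts = (pvBrk m 1 c ts).map (fun k => k + 1) := pvBrk_shift m ts c 1
    by_cases hb : pvIsBreak m t c
    · -- break before c: first row is [t], rest shifted by one
      have hbnd : (0 : Nat) :: pvBrk m 1 t (c :: ts) ++ [(c :: ts).length + 1]
          = 0 :: 1 :: ((pvBrk m 1 c ts ++ [ts.length + 1]).map (fun k => k + 1)) := by
        simp [pvBrk, hb, hshift]
      rw [hbnd]
      have h1 : pvSliceMap (t :: c :: ts)
            (0 :: 1 :: ((pvBrk m 1 c ts ++ [ts.length + 1]).map (fun k => k + 1)))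
          = ((t :: c :: ts).take 1) ::
            pvSliceMap (t :: c :: ts) ((0 :: pvBrk m 1 c ts ++ [ts.length + 1]).map (fun k => k + 1)) := by
        simp [pvSliceMap]
      rw [h1, pvSliceMap_shift]
      have hr : pvGrp m t [t] (c :: ts) = [t] :: pvGrp m c [c] ts := by simp [pvGrp, hb]
      rw [hr]
      exact congrArg₂ List.cons rfl (ih c)
    · -- no break: t is prepended onto the first row of the grouping of c :: ts
      have hbnd : (0 : Nat) :: pvBrk m 1 t (c :: ts) ++ [(c :: ts).length + 1]
          = 0 :: ((pvBrk m 1 c ts ++ [ts.length + 1]).map (fun k => k + 1)) := by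
        simp [pvBrk, hb, hshift]
      rw [hbnd, pvSliceMap_cons]
      rw [show pvSliceMap (c :: ts) (0 :: (pvBrk m 1 c ts ++ [ts.length + 1])) = pvGrp m c [c] ts
            from ih c]
      have hpre := pvGrp_prepend m ts c [c] [t]
      simp only [List.singleton_append] at hpre
      simp [pvGrp, hb, hpre]

-- casting the Int-valued bounds of the port down to pvSliceMap
theorem sliceMap_cast_aux (xs : List (List (String × Int))) :
    ∀ (l1 l2 : List Nat),
      (((l1.map (fun (k : Nat) => (k : Int))).zip (l2.map (fun (k : Nat) => (k : Int)))).map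
        (fun ab => PySem.List.slice xs (some ab.1) (some ab.2)))
      = (l1.zip l2).map (fun ab => (xs.drop ab.1).take (ab.2 - ab.1)) := by
  intro l1
  induction l1 with
  | nil => intro l2; simp
  | cons a l1 ih =>
    intro l2
    cases l2 with
    | nil => simp
    | cons b l2 =>
      simp only [List.map_cons, List.zip_cons_cons]
      rw [ih l2, PySem.List.slice_natCast]

theorem sliceMap_cast (xs : List (List (String × Int))) (bs : List Nat) :
    (((bs.map (fun (k : Nat) => (k : Int))).zip (bs.map (fun (k : Nat) => (k : Int))).tail).map
      (fun ab => PySem.List.slice xs (some ab.1) (some ab.2))) = pvSliceMap xs bs := by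
  unfold pvSliceMap
  rw [show (bs.map (fun (k : Nat) => (k : Int))).tail = bs.tail.map (fun (k : Nat) => (k : Int)) from by
        cases bs <;> simp]
  exact sliceMap_cast_aux xs bs bs.tail

-- ===== VERDICT (by name: the statement is the Claim_ definition above) =====
theorem compose_rows_spec : Claim_equal_compose_rows := by
  intro tl m _ _
  unfold Spec_compose_rows
  cases tl with
  | nil => rfl
  | cons t ts =>
    have hA : compose_rows (t :: ts) m = pvGrp m t [t] ts := by
      show composeRowsGo m (t :: ts) none [] [] = _
      rw [show composeRowsGo m (t :: ts) none [] [] = composeRowsGo m ts (some t) [t] [] from rfl,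
        composeRowsGo_eq]
      simp
    have hcast : ((0 : Nat) :: pvBrk m 1 t ts ++ [ts.length + 1]).map (fun (k : Nat) => (k : Int))
        = 0 :: (pvBrk m 1 t ts).map (fun (k : Nat) => (k : Int)) ++ [((t :: ts).length : Int)] := by
      simp
    have hB : compose_rows_alt (t :: ts) m = pvGrp m t [t] ts := by
      show ((0 :: _ ++ [((t :: ts).length : Int)]).zip (0 :: _ ++ [((t :: ts).length : Int)]).tail).map _ = _
      rw [PySem.List.slice_from_one]
      rw [show (t :: ts).tail = ts from rfl]
      rw [show (1 : Int) = ((1 : Nat) : Int) from by simp]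
      rw [enumerate_filter_eq_pvBrk m ts t 1]
      rw [← hcast, sliceMap_cast, pvSliceMap_eq_pvGrp]
    rw [hA, hB]
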